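-- pv_equiv track=rewrite | github.com/ksw0733/BOJ_Programmers | 백준/Gold/13913. 숨바꼭질 4/숨바꼭질 4.py | bfs
-- ===== SOURCE A (Python) =====
-- from collections import deque
--
-- def bfs(n, k):
--     visited = [False] * (200001)
--     q = deque()
--     q.append([n, 0, [n]])
--     visited[n] = True
--
--     if n > k:
--         return n - k, [int(x) for x in range(n, k - 1, -1)]
--
--
--     while q:
--         x, count, road = q.popleft()
--
--         if x == k:
--             return count, road
--
--         arr = [x - 1, x + 1, x * 2]
--         for a in arr:
--             if 0 <= a <= 100000 and visited[a] == False: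
--                 visited[a] = True
--                 r = road + [a]
--                 q.append([a, count + 1, r])
-- ===== SOURCE B (Python) =====
-- from collections import deque
--
-- def bfs(n, k):
--     if n > k:
--         return n - k, list(range(n, k - 1, -1))
--     seen = [False] * 100001
--     parent = [0] * 100001
--     if 0 <= n <= 100000:
--         seen[n] = True
--     q = deque([n])
--     while q:
--         x = q.popleft()
--         if x == k:
--             path = [k]
--             while path[-1] != n:
--                 path.append(parent[path[-1]])
--             path.reverse()
--             return len(path) - 1, path
--         for a in (x - 1, x + 1, x * 2):
--             if 0 <= a <= 100000 and not seen[a]: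
--                 seen[a] = True
--                 parent[a] = x
--                 q.append(a)
-- ===== Notes on version B (the rewrite author's own statement) =====
-- stated objective: faster
-- what changed: A's BFS queue carries a full copy of the path for every enqueued node (copied again on each enqueue); B runs the BFS over node ids only with parent-pointer and distance dicts and reconstructs the path once at the end, keeping the identical closed-form n>k shortcut.
import Mathlib
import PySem

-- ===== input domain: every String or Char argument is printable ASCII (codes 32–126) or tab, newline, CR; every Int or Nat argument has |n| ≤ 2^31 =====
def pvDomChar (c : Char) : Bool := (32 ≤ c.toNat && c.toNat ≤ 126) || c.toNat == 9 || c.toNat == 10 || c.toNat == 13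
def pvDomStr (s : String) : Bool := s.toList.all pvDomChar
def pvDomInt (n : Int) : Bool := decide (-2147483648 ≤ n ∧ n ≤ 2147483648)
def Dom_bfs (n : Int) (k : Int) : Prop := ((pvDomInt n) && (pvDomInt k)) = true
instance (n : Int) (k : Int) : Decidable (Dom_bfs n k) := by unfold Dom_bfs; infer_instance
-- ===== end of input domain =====

-- B replaces A's queue of ever-growing path copies by a BFS over node ids with a
-- parent-pointer array; the path is reconstructed once at the end (and its length
-- gives the count), instead of being copied into the queue on every enqueue.

-- shared fuel bound for the two while-loops (each pop consumes one queued element;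
-- at most 100002 elements are ever queued, so the fuel is never exhausted inside Pre_bfs)
def pvFuel : Nat := 200005

-- collections.deque ported as a two-list functional queue (front, back-reversed):
-- popleft takes from the front, falling back to the reversed back; append conses on back
def dqPop {α : Type} (front back : List α) : Option (α × List α × List α) :=
  match front with
  | x :: f => some (x, f, back)
  | [] =>
    match back.reverse with
    | x :: f => some (x, f, [])
    | [] => none

-- ===== PORT A =====

-- `visited[i] = True` on A's 200001-element Python list: exact (including negative-index
-- wrap) wherever Python does not raise IndexError; out-of-range i (excluded by Pre_bfs,
-- where A raises) is a no-op here.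
def vset (v : Array Bool) (i : Int) : Array Bool :=
  let j : Int := if i < 0 then i + 200001 else i
  if j < 0 then v else v.setIfInBounds j.toNat true

-- `xs[a]` on a Bool list — only ever used with 0 ≤ a < size, where it is exact
def vget (v : Array Bool) (i : Int) : Bool := v.getD i.toNat false

-- body of A's `for a in arr` loop (state: visited array, back of the queue)
def stepA (count : Int) (road : List Int)
    (st : Array Bool × List (Int × Int × List Int)) (a : Int) :
    Array Bool × List (Int × Int × List Int) :=
  if 0 ≤ a ∧ a ≤ 100000 ∧ vget st.1 a = false then
    (vset st.1 a, (a, count + 1, road ++ [a]) :: st.2)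
  else st

-- A's `while q` loop; queue elements are the [x, count, road] triples
def loopA (k : Int) : Nat → Array Bool → List (Int × Int × List Int) →
    List (Int × Int × List Int) → Int × List Int
  | 0, _, _, _ => (0, [])
  | fuel + 1, v, front, back =>
    match dqPop front back with
    | none => (0, [])
    | some ((x, count, road), f, b) =>
      if x = k then (count, road)
      else
        let st := [x - 1, x + 1, x * 2].foldl (stepA count road) (v, b)
        loopA k fuel st.1 f st.2

def bfs (n : Int) (k : Int) : Int × List Int :=
  let visited := vset (Array.replicate 200001 false) n
  if n > k then (n - k, (PySem.List.pyRange n (k - 1) (-1)).map (fun x => x))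
  else loopA k pvFuel visited [(n, 0, [n])] []

-- ===== PORT B =====

-- `seen[a] = True` / `parent[a] = x` — only ever used with 0 ≤ a ≤ 100000, where they are exact
def bset (s : Array Bool) (i : Int) : Array Bool := s.setIfInBounds i.toNat true
def pset (p : Array Int) (i w : Int) : Array Int := p.setIfInBounds i.toNat w
def aget (p : Array Int) (i : Int) : Int := p.getD i.toNat 0

-- B's reconstruction loop `while path[-1] != n: path.append(parent[path[-1]])` followed by
-- `path.reverse()`: the Python list is built by appending at the right and reversed once at
-- the end; here it is built by consing on the left (path[-1] = head), which IS the reversed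
-- list, so no final reverse is needed.  Fuel 100002 always suffices inside Pre_bfs (the
-- parent chain visits distinct nodes of {n} ∪ [0,100000]).
def walkB (pr : Array Int) (n : Int) : Nat → List Int → List Int
  | 0, path => path
  | fuel + 1, path =>
    match path with
    | [] => []
    | last :: _ => if last = n then path else walkB pr n fuel (aget pr last :: path)

-- body of B's `for a in (x-1, x+1, x*2)` loop (state: seen, parent, back of the queue)
def stepB (x : Int) (st : Array Bool × Array Int × List Int) (a : Int) :
    Array Bool × Array Int × List Int :=
  if 0 ≤ a ∧ a ≤ 100000 ∧ vget st.1 a = false then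
    (bset st.1 a, pset st.2.1 a x, a :: st.2.2)
  else st

-- B's `while q` loop; the queue holds the nodes only
def loopB (n k : Int) : Nat → Array Bool → Array Int → List Int → List Int → Int × List Int
  | 0, _, _, _, _ => (0, [])
  | fuel + 1, sn, pr, front, back =>
    match dqPop front back with
    | none => (0, [])
    | some (x, f, b) =>
      if x = k then
        let path := walkB pr n 100002 [k]
        ((path.length : Int) - 1, path)
      else
        let st := [x - 1, x + 1, x * 2].foldl (stepB x) (sn, pr, b)
        loopB n k fuel st.1 st.2.1 f st.2.2

def bfs_alt (n : Int) (k : Int) : Int × List Int :=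
  if n > k then (n - k, PySem.List.pyRange n (k - 1) (-1))
  else
    let seen :=
      if 0 ≤ n ∧ n ≤ 100000 then bset (Array.replicate 100001 false) n
      else Array.replicate 100001 false
    loopB n k pvFuel seen (Array.replicate 100001 0) [n] []

-- ===== PRECONDITION & SPEC =====
-- Pre_bfs is exactly the set of inputs on which A returns a value: outside it A either
-- raises IndexError (|n| out of the visited list's range) or falls off the while loop
-- and returns None (k unreachable: n ≤ -2 with n < k, or n < k > 100000).
def Pre_bfs (n : Int) (k : Int) : Prop :=
  (k < n ∧ -200001 ≤ n ∧ n ≤ 200000) ∨ (n = k ∧ -200001 ≤ n ∧ n ≤ 200000) ∨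
  (n < k ∧ -1 ≤ n ∧ k ≤ 100000)
instance (n : Int) (k : Int) : Decidable (Pre_bfs n k) := by unfold Pre_bfs; infer_instance

def pvWitness_bfs : Int × Int := (5, 17)

def Spec_bfs (n : Int) (k : Int) (out : Int × List Int) : Prop := out = bfs_alt n k
instance (n : Int) (k : Int) (out : Int × List Int) : Decidable (Spec_bfs n k out) := by unfold Spec_bfs; infer_instance

-- ===== CLAIM (what is proved, stated in full; the proofs are below) =====
def Claim_equal_bfs : Prop := ∀ (n : Int) (k : Int), Dom_bfs n k → Pre_bfs n k → Spec_bfs n k (bfs n k)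

-- ===== LEMMAS AND PROOFS =====

-- `Chain sn pr n x r` : r is the root-first chain from the BFS root n to x along the
-- parent array pr, all non-root nodes being marked in sn
inductive Chain (sn : Array Bool) (pr : Array Int) (n : Int) : Int → List Int → Prop
  | root : Chain sn pr n n [n]
  | step {x y : Int} {l : List Int} : Chain sn pr n y l → 0 ≤ x → x ≤ 100000 →
      x ≠ n → vget sn x = true → aget pr x = y → Chain sn pr n x (l ++ [x])

theorem chain_nodes {sn : Array Bool} {pr : Array Int} {n x : Int} {r : List Int}
    (h : Chain sn pr n x r) :
    ∀ y ∈ r, y = n ∨ (0 ≤ y ∧ y ≤ 100000 ∧ vget sn y = true ∧ y ≠ n) := by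
  induction h with
  | root => intro y hy; simp at hy; exact Or.inl hy
  | step _ h0 h1 h2 h3 _ ih =>
      intro y hy
      rcases List.mem_append.1 hy with hy | hy
      · exact ih y hy
      · simp at hy; subst hy; exact Or.inr ⟨h0, h1, h3, h2⟩

theorem chain_walk {sn : Array Bool} {pr : Array Int} {n x : Int} {r : List Int}
    (h : Chain sn pr n x r) : ∀ (fuel : Nat) (acc : List Int), r.length ≤ fuel + 1 →
    walkB pr n fuel (x :: acc) = r ++ acc := by
  induction h with
  | root =>
      intro fuel acc _
      cases fuel with
      | zero => rfl
      | succ f => simp [walkB]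
  | @step z y l hc h0 h1 h2 h3 h4 ih =>
      intro fuel acc hf
      have hl : 1 ≤ l.length := by
        cases hc <;> simp
      obtain ⟨f, rfl⟩ : ∃ f, fuel = f + 1 := by
        cases fuel with
        | zero => rw [List.length_append, List.length_singleton] at hf; omega
        | succ f => exact ⟨f, rfl⟩
      show (if z = n then z :: acc else walkB pr n f (aget pr z :: z :: acc)) = (l ++ [z]) ++ acc
      rw [if_neg h2, h4, ih f (z :: acc) (by rw [List.length_append, List.length_singleton] at hf; omega)]
      simp

-- array get/set helper lemmas
theorem size_vset (v : Array Bool) (i : Int) : (vset v i).size = v.size := by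
  unfold vset
  dsimp only
  by_cases h : (if i < 0 then i + 200001 else i) < 0 <;> simp [h, Array.size_setIfInBounds]

theorem vget_vset {v : Array Bool} (hs : v.size = 200001) {i : Int}
    (hi0 : 0 ≤ i) (hi1 : i ≤ 100000) {j : Int} (hj0 : 0 ≤ j) (hj1 : j ≤ 100000) :
    vget (vset v i) j = (if j = i then true else vget v j) := by
  unfold vset vget
  have hneg : ¬ i < 0 := by omega
  simp only [hneg, if_false]
  have hlt : i.toNat < v.size := by omega
  have hjlt : j.toNat < v.size := by omega
  by_cases hji : j = i
  · subst hji
    simp [Array.getD, Array.size_setIfInBounds, hjlt]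
  · have hne : i.toNat ≠ j.toNat := by omega
    rw [if_neg hji]
    simp [Array.getD, Array.size_setIfInBounds, hjlt, hne]

theorem vget_vset_neg_one {v : Array Bool} (hs : v.size = 200001) {j : Int}
    (hj0 : 0 ≤ j) (hj1 : j ≤ 100000) : vget (vset v (-1)) j = vget v j := by
  unfold vset vget
  norm_num
  have h1 : j.toNat < v.size := by omega
  have h2 : (200000 : Nat) ≠ j.toNat := by omega
  simp [Array.size_setIfInBounds, h1, h2]

theorem vget_bset {s : Array Bool} (hs : s.size = 100001) {a : Int}
    (ha0 : 0 ≤ a) (ha1 : a ≤ 100000) {j : Int} (hj0 : 0 ≤ j) (hj1 : j ≤ 100000) :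
    vget (bset s a) j = (if j = a then true else vget s j) := by
  unfold bset vget
  have hat : a.toNat < s.size := by omega
  have hjt : j.toNat < s.size := by omega
  by_cases hja : j = a
  · subst hja
    simp [Array.getD, Array.size_setIfInBounds, hjt]
  · have hne : a.toNat ≠ j.toNat := by omega
    rw [if_neg hja]
    simp [Array.getD, Array.size_setIfInBounds, hjt, hne]

theorem aget_pset {p : Array Int} (hp : p.size = 100001) {a : Int}
    (ha0 : 0 ≤ a) (ha1 : a ≤ 100000) {w j : Int} (hj0 : 0 ≤ j) (hj1 : j ≤ 100000) :
    aget (pset p a w) j = (if j = a then w else aget p j) := by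
  unfold pset aget
  have hat : a.toNat < p.size := by omega
  have hjt : j.toNat < p.size := by omega
  by_cases hja : j = a
  · subst hja
    simp [Array.getD, Array.size_setIfInBounds, hjt]
  · have hne : a.toNat ≠ j.toNat := by omega
    rw [if_neg hja]
    simp [Array.getD, Array.size_setIfInBounds, hjt, hne]

theorem vget_bset_ne {s : Array Bool} {a j : Int} (h : j.toNat ≠ a.toNat) :
    vget (bset s a) j = vget s j := by
  unfold bset vget
  by_cases hlt : j.toNat < s.size
  · simp [Array.getD, Array.size_setIfInBounds, hlt, Ne.symm h]
  · simp [Array.getD, Array.size_setIfInBounds, hlt]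

theorem vget_replicate {sz : Nat} {j : Int} (hj : j.toNat < sz) :
    vget (Array.replicate sz false) j = false := by
  simp [vget, Array.getD, hj]

-- a parent chain is unaffected by marking/assigning a yet-unseen node a
theorem chain_stable {sn : Array Bool} {pr : Array Int} {n y : Int} {l : List Int}
    (h : Chain sn pr n y l) (hsn : sn.size = 100001) (hpr : pr.size = 100001)
    {a : Int} (ha0 : 0 ≤ a) (ha1 : a ≤ 100000) (ha : vget sn a = false) (w : Int) :
    Chain (bset sn a) (pset pr a w) n y l := by
  induction h with
  | root => exact Chain.root
  | @step z y' l' _ h0 h1 h2 h3 h4 ih =>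
      have hza : z ≠ a := by
        intro hh; rw [hh] at h3; rw [h3] at ha; exact Bool.noConfusion ha
      refine Chain.step ih h0 h1 h2 ?_ ?_
      · rw [vget_bset hsn ha0 ha1 h0 h1, if_neg hza]; exact h3
      · rw [aget_pset hpr ha0 ha1 h0 h1, if_neg hza]; exact h4

theorem chain_length_le {sn : Array Bool} {pr : Array Int} {n x : Int} {r : List Int}
    (h : Chain sn pr n x r) (hnr : r.Nodup) : r.length ≤ 100002 := by
  have hsub : r ⊆ n :: PySem.List.pyRange 0 100001 1 := by
    intro y hy
    rcases chain_nodes h y hy with hy' | ⟨hy0, hy1, _, _⟩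
    · simp [hy']
    · refine List.mem_cons_of_mem _ ?_
      rw [PySem.List.mem_pyRange_one]
      omega
  have hle := (List.subperm_of_subset hnr hsub).length_le
  have hlen : (n :: PySem.List.pyRange 0 100001 1).length = 100002 := by
    rw [List.length_cons, PySem.List.length_pyRange_one]
    decide
  omega

-- the invariants of the lockstep simulation
def EntOk (sn : Array Bool) (pr : Array Int) (n : Int) (e : Int × Int × List Int) : Prop :=
  e.2.1 = (e.2.2.length : Int) - 1 ∧ Chain sn pr n e.1 e.2.2 ∧ e.2.2.Nodup

def VRel (sn : Array Bool) (pr : Array Int) (v : Array Bool) : Prop :=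
  v.size = 200001 ∧ sn.size = 100001 ∧ pr.size = 100001 ∧
  (∀ j : Int, 0 ≤ j → j ≤ 100000 → vget v j = vget sn j)

theorem dqPop_map {α β : Type} (g : α → β) (front back : List α) :
    dqPop (front.map g) (back.map g) =
      (dqPop front back).map (fun t => (g t.1, t.2.1.map g, t.2.2.map g)) := by
  cases front with
  | cons x f => rfl
  | nil =>
      simp only [List.map_nil, dqPop, ← List.map_reverse]
      generalize back.reverse = br
      cases br <;> rfl

theorem dqPop_mem {α : Type} {front back f b : List α} {x : α}
    (h : dqPop front back = some (x, f, b)) :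
    x ∈ front ++ back ∧ ∀ y ∈ f ++ b, y ∈ front ++ back := by
  cases front with
  | cons z f' =>
      simp only [dqPop, Option.some.injEq, Prod.mk.injEq] at h
      obtain ⟨rfl, rfl, rfl⟩ := h
      refine ⟨by simp, ?_⟩
      intro y hy
      rcases List.mem_append.1 hy with hy | hy
      · simp [hy]
      · simp [hy]
  | nil =>
      simp only [dqPop] at h
      cases hrev : back.reverse with
      | nil => rw [hrev] at h; exact absurd h (by simp)
      | cons z f' =>
          rw [hrev] at h
          simp only [Option.some.injEq, Prod.mk.injEq] at h
          obtain ⟨rfl, rfl, rfl⟩ := h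
          have hz : z ∈ back := by rw [← List.mem_reverse, hrev]; simp
          refine ⟨by simp [hz], ?_⟩
          intro y hy
          simp only [List.append_nil] at hy
          have hyb : y ∈ back := by rw [← List.mem_reverse, hrev]; simp [hy]
          simp [hyb]

-- what holds of the two fold states after the inner `for` loops (sn, pr are the
-- PRE-fold B-state, for the preservation clause)
def FoldOk (n : Int) (sn : Array Bool) (pr : Array Int)
    (sA : Array Bool × List (Int × Int × List Int))
    (sB : Array Bool × Array Int × List Int) : Prop :=
  sB.2.2 = sA.2.map (·.1) ∧
  (∀ e, EntOk sn pr n e → EntOk sB.1 sB.2.1 n e) ∧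
  (∀ e ∈ sA.2, EntOk sB.1 sB.2.1 n e) ∧
  VRel sB.1 sB.2.1 sA.1 ∧ (0 ≤ n → vget sB.1 n = true)

-- one fold step of both inner `for` loops stays in lockstep
theorem fold_rel (n x c : Int) (r : List Int) :
    ∀ (l : List Int) (sn : Array Bool) (pr : Array Int) (v : Array Bool)
      (bA : List (Int × Int × List Int)),
      (∀ e ∈ bA, EntOk sn pr n e) → VRel sn pr v → (0 ≤ n → vget sn n = true) →
      c = (r.length : Int) - 1 → Chain sn pr n x r → r.Nodup →
      FoldOk n sn pr (l.foldl (stepA c r) (v, bA)) (l.foldl (stepB x) (sn, pr, bA.map (·.1))) := by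
  intro l
  induction l with
  | nil =>
      intro sn pr v bA hB hV hSI _ _ _
      exact ⟨rfl, fun e he => he, hB, hV, hSI⟩
  | cons a l ih =>
      intro sn pr v bA hB hV hSI hcr hcx hnr
      simp only [List.foldl_cons]
      obtain ⟨hv, hsn, hpr, hcorr⟩ := hV
      by_cases hg : 0 ≤ a ∧ a ≤ 100000 ∧ vget sn a = false
      · -- both guards fire
        have hgA : (0 ≤ a ∧ a ≤ 100000 ∧ vget v a = false) :=
          ⟨hg.1, hg.2.1, by rw [hcorr a hg.1 hg.2.1]; exact hg.2.2⟩
        rw [show stepA c r (v, bA) a = (vset v a, (a, c + 1, r ++ [a]) :: bA) by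
              simp [stepA, hgA],
            show stepB x (sn, pr, bA.map (·.1)) a =
              (bset sn a, pset pr a x, a :: bA.map (·.1)) by simp [stepB, hg]]
        have han : a ≠ n := by
          intro hh
          by_cases hn0 : 0 ≤ n
          · rw [hh] at hg; rw [hSI hn0] at hg; exact Bool.noConfusion hg.2.2
          · omega
        have hstab : ∀ e, EntOk sn pr n e → EntOk (bset sn a) (pset pr a x) n e := by
          intro e he
          exact ⟨he.1, chain_stable he.2.1 hsn hpr hg.1 hg.2.1 hg.2.2 x, he.2.2⟩
        have hanotr : a ∉ r := by
          intro hmem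
          rcases chain_nodes hcx a hmem with hh | ⟨_, _, hh, _⟩
          · exact han hh
          · rw [hh] at hg; exact Bool.noConfusion hg.2.2
        have hnew : EntOk (bset sn a) (pset pr a x) n (a, c + 1, r ++ [a]) := by
          refine ⟨?_, ?_, ?_⟩
          · show c + 1 = ((r ++ [a]).length : Int) - 1
            rw [List.length_append, List.length_singleton]
            omega
          · refine Chain.step (chain_stable hcx hsn hpr hg.1 hg.2.1 hg.2.2 x)
              hg.1 hg.2.1 han ?_ ?_
            · rw [vget_bset hsn hg.1 hg.2.1 hg.1 hg.2.1, if_pos rfl]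
            · rw [aget_pset hpr hg.1 hg.2.1 hg.1 hg.2.1, if_pos rfl]
          · show (r ++ [a]).Nodup
            simp [List.nodup_append, hnr]
            intro y hy hya
            exact hanotr (hya ▸ hy)
        have hB' : ∀ e ∈ (a, c + 1, r ++ [a]) :: bA, EntOk (bset sn a) (pset pr a x) n e := by
          intro e he
          rcases List.mem_cons.1 he with he | he
          · subst he; exact hnew
          · exact hstab e (hB e he)
        have hV' : VRel (bset sn a) (pset pr a x) (vset v a) := by
          refine ⟨by rw [size_vset]; exact hv,
            by simp [bset, Array.size_setIfInBounds, hsn],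
            by simp [pset, Array.size_setIfInBounds, hpr], ?_⟩
          intro j hj0 hj1
          rw [vget_vset hv hg.1 hg.2.1 hj0 hj1, vget_bset hsn hg.1 hg.2.1 hj0 hj1]
          by_cases hja : j = a <;> simp [hja, hcorr j hj0 hj1]
        have hSI' : 0 ≤ n → vget (bset sn a) n = true := by
          intro hn0
          rw [vget_bset_ne (by omega)]
          exact hSI hn0
        have hcx' : Chain (bset sn a) (pset pr a x) n x r :=
          chain_stable hcx hsn hpr hg.1 hg.2.1 hg.2.2 x
        obtain ⟨t1, t2, t3, t4, t5⟩ := ih (bset sn a) (pset pr a x) (vset v a)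
          ((a, c + 1, r ++ [a]) :: bA) hB' hV' hSI' hcr hcx' hnr
        exact ⟨t1, fun e he => t2 e (hstab e he), t3, t4, t5⟩
      · -- neither guard fires
        have hgA : ¬ (0 ≤ a ∧ a ≤ 100000 ∧ vget v a = false) := by
          intro hh
          exact hg ⟨hh.1, hh.2.1, by rw [← hcorr a hh.1 hh.2.1]; exact hh.2.2⟩
        rw [show stepA c r (v, bA) a = (v, bA) by simp [stepA, hgA],
            show stepB x (sn, pr, bA.map (·.1)) a = (sn, pr, bA.map (·.1)) by simp [stepB, hg]]
        exact ih sn pr v bA hB ⟨hv, hsn, hpr, hcorr⟩ hSI hcr hcx hnr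

theorem loopA_succ (k : Int) (f : Nat) (v : Array Bool)
    (front back : List (Int × Int × List Int)) :
    loopA k (f + 1) v front back =
      (match dqPop front back with
       | none => (0, [])
       | some ((x, count, road), fr, b) =>
         if x = k then (count, road)
         else
           let st := [x - 1, x + 1, x * 2].foldl (stepA count road) (v, b)
           loopA k f st.1 fr st.2) := rfl

theorem loopB_succ (n k : Int) (f : Nat) (sn : Array Bool) (pr : Array Int)
    (front back : List Int) :
    loopB n k (f + 1) sn pr front back =
      (match dqPop front back with
       | none => (0, [])
       | some (x, fr, b) =>
         if x = k then
           let path := walkB pr n 100002 [k]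
           ((path.length : Int) - 1, path)
         else
           let st := [x - 1, x + 1, x * 2].foldl (stepB x) (sn, pr, b)
           loopB n k f st.1 st.2.1 fr st.2.2) := rfl

-- the two while-loops stay in lockstep
theorem lockstep (n k : Int) : ∀ (fuel : Nat) (sn : Array Bool) (pr : Array Int)
    (v : Array Bool) (fA bA : List (Int × Int × List Int)),
    (∀ e ∈ fA ++ bA, EntOk sn pr n e) → VRel sn pr v → (0 ≤ n → vget sn n = true) →
    loopA k fuel v fA bA = loopB n k fuel sn pr (fA.map (·.1)) (bA.map (·.1)) := by
  intro fuel
  induction fuel with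
  | zero => intro sn pr v fA bA _ _ _; rfl
  | succ f ih =>
      intro sn pr v fA bA hE hV hSI
      rw [loopA_succ, loopB_succ, dqPop_map]
      cases hpop : dqPop fA bA with
      | none => rfl
      | some t =>
          obtain ⟨⟨x, c, r⟩, fr, b⟩ := t
          obtain ⟨hxm, hsub⟩ := dqPop_mem hpop
          obtain ⟨hcr, hcx, hnr⟩ := hE _ hxm
          dsimp only at hcr hcx hnr
          simp only [Option.map_some]
          by_cases hxk : x = k
          · rw [if_pos hxk, if_pos hxk]
            subst hxk
            rw [show walkB pr n 100002 [x] = r ++ [] from chain_walk hcx 100002 []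
                  (by have := chain_length_le hcx hnr; omega)]
            simp [hcr]
          · rw [if_neg hxk, if_neg hxk]
            have hb : ∀ e ∈ b, EntOk sn pr n e := fun e he =>
              hE e (hsub e (List.mem_append.2 (Or.inr he)))
            obtain ⟨t1, t2, t3, t4, t5⟩ :=
              fold_rel n x c r [x - 1, x + 1, x * 2] sn pr v b hb hV hSI hcr hcx hnr
            show loopA k f _ _ _ = loopB n k f _ _ _ _
            rw [t1]
            refine ih _ _ _ _ _ ?_ t4 t5
            intro e he
            rcases List.mem_append.1 he with he | he
            · exact t2 e (hE e (hsub e (List.mem_append.2 (Or.inl he))))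
            · exact t3 e he

-- ===== VERDICT (by name: the statement is the Claim_ definition above) =====
theorem bfs_spec : Claim_equal_bfs := by
  intro n k _ hpre
  show bfs n k = bfs_alt n k
  rcases hpre with ⟨h1, h2, h3⟩ | ⟨h1, h2, h3⟩ | ⟨h1, h2, h3⟩
  · -- k < n : both take the closed-form branch
    have hnk : n > k := h1
    simp [bfs, bfs_alt, if_pos hnk]
  · -- n = k : both loops return at the very first pop
    subst h1
    have hnk : ¬ n > n := by omega
    simp only [bfs, bfs_alt, if_neg hnk]
    rw [show pvFuel = 200004 + 1 from rfl, loopA_succ, loopB_succ]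
    show (if n = n then ((0 : Int), [n]) else _) = (if n = n then _ else _)
    rw [if_pos rfl, if_pos rfl]
    have hc : Chain (if 0 ≤ n ∧ n ≤ 100000 then bset (Array.replicate 100001 false) n
        else Array.replicate 100001 false) (Array.replicate 100001 0) n n [n] := Chain.root
    rw [show walkB (Array.replicate 100001 0) n 100002 [n] = [n] ++ [] from
          chain_walk hc 100002 [] (by simp)]
    simp
  · -- n < k : the two BFS loops run in lockstep
    have hnk : ¬ n > k := by omega
    simp only [bfs, bfs_alt, if_neg hnk]
    have hE0 : ∀ e ∈ ([(n, 0, [n])] ++ ([] : List (Int × Int × List Int))),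
        EntOk (if 0 ≤ n ∧ n ≤ 100000 then bset (Array.replicate 100001 false) n
          else Array.replicate 100001 false) (Array.replicate 100001 0) n e := by
      intro e he
      simp only [List.append_nil, List.mem_singleton] at he; subst he
      exact ⟨by simp, Chain.root, List.nodup_singleton n⟩
    have hV0 : VRel (if 0 ≤ n ∧ n ≤ 100000 then bset (Array.replicate 100001 false) n
        else Array.replicate 100001 false) (Array.replicate 100001 0)
        (vset (Array.replicate 200001 false) n) := by
      refine ⟨by rw [size_vset]; simp, ?_, by simp, ?_⟩
      · by_cases hn : 0 ≤ n ∧ n ≤ 100000 <;>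
          simp [hn, bset, Array.size_setIfInBounds]
      · intro j hj0 hj1
        by_cases hn0 : 0 ≤ n
        · have hn1 : n ≤ 100000 := by omega
          rw [if_pos ⟨hn0, hn1⟩, vget_vset (by simp) hn0 hn1 hj0 hj1,
            vget_bset (by simp) hn0 hn1 hj0 hj1]
          have hra : vget (Array.replicate 200001 false) j = false :=
            vget_replicate (by omega)
          have hrb : vget (Array.replicate 100001 false) j = false :=
            vget_replicate (by omega)
          by_cases hjn : j = n <;> simp [hjn, hra, hrb]
        · have hne : n = -1 := by omega
          subst hne
          rw [if_neg (by omega), vget_vset_neg_one (by simp) hj0 hj1]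
          have hra : vget (Array.replicate 200001 false) j = false :=
            vget_replicate (by omega)
          have hrb : vget (Array.replicate 100001 false) j = false :=
            vget_replicate (by omega)
          simp [hra, hrb]
    have hSI0 : 0 ≤ n → vget (if 0 ≤ n ∧ n ≤ 100000 then bset (Array.replicate 100001 false) n
        else Array.replicate 100001 false) n = true := by
      intro hn0
      have hn1 : n ≤ 100000 := by omega
      rw [if_pos ⟨hn0, hn1⟩, vget_bset (by simp) hn0 hn1 hn0 hn1, if_pos rfl]
    have := lockstep n k pvFuel _ _ _ [(n, 0, [n])] [] hE0 hV0 hSI0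
    simpa using this
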